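-- pv_equiv track=rewrite | github.com/Tanav-Kolar/Database-to-Dashboard-Agent | src/database/postgres_mcp_server.py | is_read_only
-- ===== SOURCE A (Python) =====
-- def is_read_only(query: str) -> bool:
--     """Check if a query is read-only."""
--     forbidden_keywords = [
--         "INSERT", "UPDATE", "DELETE", "DROP", "ALTER", "TRUNCATE",
--         "CREATE", "GRANT", "REVOKE", "COMMIT", "ROLLBACK"
--     ]
--     normalized_query = query.strip().upper()
--
--     # Check for forbidden keywords at the start or after a semicolon
--     # This is a basic check; for production, use a proper SQL parser
--     for keyword in forbidden_keywords:
--         if normalized_query.startswith(keyword) or f"; {keyword}" in normalized_query or f";{keyword}" in normalized_query: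
--             return False
--     return True
-- ===== SOURCE B (Python) =====
-- _KEYWORDS = (
--     "INSERT", "UPDATE", "DELETE", "DROP", "ALTER", "TRUNCATE",
--     "CREATE", "GRANT", "REVOKE", "COMMIT", "ROLLBACK",
-- )
--
--
-- def is_read_only(query: str) -> bool:
--     """Check if a query is read-only."""
--     q = query.strip().upper()
--     # Single left-to-right scan over statement-start positions: position 0,
--     # right after a ';', or after '; ' (one space); a forbidden keyword may
--     # only begin at such a position.
--     for i in range(len(q) + 1):
--         if i == 0 or q[i - 1] == ";" or (i >= 2 and q[i - 2] == ";" and q[i - 1] == " "):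
--             if any(q[i:].startswith(kw) for kw in _KEYWORDS):
--                 return False
--     return True
-- ===== Notes on version B (the rewrite author's own statement) =====
-- stated objective: alternative
-- what changed: Instead of looping over the 11 keywords and running three substring searches per keyword, B makes a single left-to-right scan over statement-start positions (0, right after ';', or after '; ') and checks keyword prefixes only there.
import Mathlib
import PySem

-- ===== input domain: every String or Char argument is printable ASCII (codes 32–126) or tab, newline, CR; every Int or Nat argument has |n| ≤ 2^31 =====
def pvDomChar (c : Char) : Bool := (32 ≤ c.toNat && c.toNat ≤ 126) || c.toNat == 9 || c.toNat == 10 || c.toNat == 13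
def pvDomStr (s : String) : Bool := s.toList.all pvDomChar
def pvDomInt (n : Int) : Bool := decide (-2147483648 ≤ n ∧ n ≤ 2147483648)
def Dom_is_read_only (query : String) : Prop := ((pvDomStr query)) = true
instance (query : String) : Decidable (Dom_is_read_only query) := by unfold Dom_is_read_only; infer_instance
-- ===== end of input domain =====

-- B replaces A's per-keyword substring searches by a single left-to-right scan over
-- statement-start positions (0, after ';', after '; ') checking keyword prefixes there.

-- ===== PORT A =====
def pvKeywordsA : List (List Char) :=
  ["INSERT".toList, "UPDATE".toList, "DELETE".toList, "DROP".toList, "ALTER".toList,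
   "TRUNCATE".toList, "CREATE".toList, "GRANT".toList, "REVOKE".toList, "COMMIT".toList,
   "ROLLBACK".toList]

-- the 'for keyword in forbidden_keywords' loop with its early 'return False'
def pvLoopA (q : List Char) : List (List Char) → Bool
  | [] => true
  | kw :: rest =>
    if PySem.Chars.startswith q kw || PySem.Chars.isIn (';' :: ' ' :: kw) q
        || PySem.Chars.isIn (';' :: kw) q then
      false
    else pvLoopA q rest

def is_read_only (query : String) : Bool :=
  pvLoopA (PySem.Chars.upper (PySem.Chars.strip query.toList)) pvKeywordsA

-- ===== PORT B =====
def pvKeywordsB : List (List Char) :=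
  ["INSERT".toList, "UPDATE".toList, "DELETE".toList, "DROP".toList, "ALTER".toList,
   "TRUNCATE".toList, "CREATE".toList, "GRANT".toList, "REVOKE".toList, "COMMIT".toList,
   "ROLLBACK".toList]

-- 'i == 0 or q[i-1] == ";" or (i >= 2 and q[i-2] == ";" and q[i-1] == " ")';
-- indices are always in range when reached, so List.getD is exact here
def pvCheckpoint (q : List Char) (i : Nat) : Bool :=
  (i == 0) || (q.getD (i - 1) ' ' == ';')
    || (decide (2 ≤ i) && (q.getD (i - 2) ' ' == ';') && (q.getD (i - 1) ' ' == ' '))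

-- 'any(q[i:].startswith(kw) for kw in _KEYWORDS)'; q[i:] with 0 ≤ i is q.drop i
def pvHit (q : List Char) (i : Nat) : Bool :=
  pvKeywordsB.any (fun kw => PySem.Chars.startswith (q.drop i) kw)

-- 'for i in range(len(q) + 1)' with its early 'return False'
def pvLoopB (q : List Char) : List Nat → Bool
  | [] => true
  | i :: rest => if pvCheckpoint q i && pvHit q i then false else pvLoopB q rest

def is_read_only_alt (query : String) : Bool :=
  let q := PySem.Chars.upper (PySem.Chars.strip query.toList)
  pvLoopB q (List.range (q.length + 1))

-- ===== PRECONDITION & SPEC =====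
def Spec_is_read_only (query : String) (out : Bool) : Prop := out = is_read_only_alt query
instance (query : String) (out : Bool) : Decidable (Spec_is_read_only query out) := by unfold Spec_is_read_only; infer_instance

-- ===== CLAIM (what is proved, stated in full; the proofs are below) =====
def Claim_equal_is_read_only : Prop := ∀ (query : String), Dom_is_read_only query → Spec_is_read_only query (is_read_only query)

-- ===== LEMMAS AND PROOFS =====

lemma pvLoopA_eq (q : List Char) (K : List (List Char)) :
    pvLoopA q K = !K.any (fun kw => PySem.Chars.startswith q kw
      || PySem.Chars.isIn (';' :: ' ' :: kw) q || PySem.Chars.isIn (';' :: kw) q) := by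
  induction K with
  | nil => rfl
  | cons kw rest ih =>
    rw [pvLoopA, List.any_cons]
    split_ifs with h <;> simp [h, ih]

lemma pvLoopB_eq (q : List Char) (I : List Nat) :
    pvLoopB q I = !I.any (fun i => pvCheckpoint q i && pvHit q i) := by
  induction I with
  | nil => rfl
  | cons i rest ih =>
    rw [pvLoopB, List.any_cons]
    split_ifs with h <;> simp [h, ih]

lemma pv_cons_prefix_drop (q cs : List Char) (c : Char) (j : Nat) :
    ((c :: cs) <+: q.drop j) ↔ j < q.length ∧ q.getD j ' ' = c ∧ cs <+: q.drop (j + 1) := by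
  constructor
  · intro h
    have hlen : j < q.length := by
      by_contra hn
      push Not at hn
      rw [List.drop_eq_nil_of_le hn] at h
      simp at h
    rw [List.drop_eq_getElem_cons hlen, List.cons_prefix_cons] at h
    exact ⟨hlen, by rw [List.getD_eq_getElem _ _ hlen, h.1], h.2⟩
  · rintro ⟨hlen, hg, hp⟩
    rw [List.drop_eq_getElem_cons hlen, List.cons_prefix_cons]
    exact ⟨by rw [← hg, List.getD_eq_getElem _ _ hlen], hp⟩

lemma pv_core (q : List Char) :
    (List.range (q.length + 1)).any (fun i => pvCheckpoint q i && pvHit q i)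
      = pvKeywordsA.any (fun kw => PySem.Chars.startswith q kw
          || PySem.Chars.isIn (';' :: ' ' :: kw) q || PySem.Chars.isIn (';' :: kw) q) := by
  rw [Bool.eq_iff_iff]
  simp only [List.any_eq_true, List.mem_range, Bool.and_eq_true, Bool.or_eq_true,
    pvCheckpoint, pvHit, pvKeywordsB, pvKeywordsA, PySem.Chars.startswith_iff,
    ← PySem.Chars.exists_prefix_drop_iff_isIn, decide_eq_true_eq, beq_iff_eq]
  constructor
  · rintro ⟨i, hi, hcp, kw, hkw, hpre⟩
    refine ⟨kw, hkw, ?_⟩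
    by_cases hi0 : i = 0
    · subst hi0; simp at hpre; exact Or.inl (Or.inl hpre)
    · rcases hcp with (h0 | hsemi) | ⟨⟨h2, hs⟩, hsp⟩
      · omega
      · refine Or.inr ⟨i - 1, ?_⟩
        rw [pv_cons_prefix_drop]
        refine ⟨by omega, hsemi, ?_⟩
        have e1 : i - 1 + 1 = i := by omega
        rw [e1]; exact hpre
      · refine Or.inl (Or.inr ⟨i - 2, ?_⟩)
        rw [pv_cons_prefix_drop]
        refine ⟨by omega, hs, ?_⟩
        rw [pv_cons_prefix_drop]
        have e1 : i - 2 + 1 = i - 1 := by omega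
        have e2 : i - 1 + 1 = i := by omega
        rw [e1, e2]
        exact ⟨by omega, hsp, hpre⟩
  · rintro ⟨kw, hkw, (hpre | ⟨j, hj⟩) | ⟨j, hj⟩⟩
    · exact ⟨0, by omega, Or.inl (Or.inl rfl), kw, hkw, by simpa using hpre⟩
    · rw [pv_cons_prefix_drop] at hj
      obtain ⟨hjl, hs, hj'⟩ := hj
      rw [pv_cons_prefix_drop] at hj'
      obtain ⟨hjl', hsp, hpre'⟩ := hj'
      refine ⟨j + 2, by omega, Or.inr ⟨⟨by omega, ?_⟩, ?_⟩, kw, hkw, hpre'⟩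
      · have e : j + 2 - 2 = j := by omega
        rw [e]; exact hs
      · have e : j + 2 - 1 = j + 1 := by omega
        rw [e]; exact hsp
    · rw [pv_cons_prefix_drop] at hj
      obtain ⟨hjl, hs, hpre'⟩ := hj
      refine ⟨j + 1, by omega, Or.inl (Or.inr ?_), kw, hkw, hpre'⟩
      have e : j + 1 - 1 = j := by omega
      rw [e]; exact hs

-- ===== VERDICT (by name: the statement is the Claim_ definition above) =====
theorem is_read_only_spec : Claim_equal_is_read_only := by
  intro query _
  unfold Spec_is_read_only is_read_only is_read_only_alt
  rw [pvLoopA_eq, pvLoopB_eq, pv_core]
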